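-- pv_equiv track=rewrite | github.com/gabriellaec/desoft-analise-exercicios | backup/user_287/ch130_2020_04_01_17_57_42_238905.py | monta_mala
-- ===== SOURCE A (Python) =====
-- def monta_mala(pesos):
--     result=[]
--     x=0
--     for i in range (len(pesos)):
--         x+=pesos[i]
--         if x>23:
--             break
--         result.append(pesos[i])
--     return result
-- ===== SOURCE B (Python) =====
-- def monta_mala(pesos):
--     # prefix sums in one pass, then find the cutoff index and slice
--     sums = []
--     t = 0
--     for p in pesos:
--         t += p
--         sums.append(t)
--     k = 0
--     while k < len(sums) and sums[k] <= 23: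
--         k += 1
--     return pesos[:k]
-- ===== Notes on version B (the rewrite author's own statement) =====
-- stated objective: alternative
-- what changed: B builds the prefix-sum list first, locates the first index whose cumulative sum exceeds 23, and returns a slice of the input, instead of A's single scan that appends elements and breaks.
import Mathlib
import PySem

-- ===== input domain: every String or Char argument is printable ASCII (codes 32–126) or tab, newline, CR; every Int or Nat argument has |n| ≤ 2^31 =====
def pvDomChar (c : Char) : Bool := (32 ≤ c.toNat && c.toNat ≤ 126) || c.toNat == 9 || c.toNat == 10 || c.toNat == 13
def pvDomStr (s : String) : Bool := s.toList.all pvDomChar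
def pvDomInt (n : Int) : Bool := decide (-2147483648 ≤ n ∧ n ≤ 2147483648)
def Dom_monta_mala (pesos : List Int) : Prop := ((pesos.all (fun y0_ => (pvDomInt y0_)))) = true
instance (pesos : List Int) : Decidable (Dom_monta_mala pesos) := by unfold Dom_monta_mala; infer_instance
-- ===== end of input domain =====

-- ===== PORT A =====
-- loop of A: running sum x, append while x ≤ 23, break on first overflow
def montaMalaLoop : List Int → Int → List Int
  | [], _ => []
  | p :: rest, x =>
      if x + p > 23 then [] else p :: montaMalaLoop rest (x + p)

def monta_mala (pesos : List Int) : List Int := montaMalaLoop pesos 0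

-- ===== PORT B =====
-- B's first pass: the list of prefix sums (running total t)
def prefixSumsB : List Int → Int → List Int
  | [], _ => []
  | p :: rest, t => (t + p) :: prefixSumsB rest (t + p)

-- B's while loop: count leading sums ≤ 23
def cutoffB : List Int → Nat
  | [] => 0
  | s :: rest => if s ≤ 23 then 1 + cutoffB rest else 0

def monta_mala_alt (pesos : List Int) : List Int :=
  pesos.take (cutoffB (prefixSumsB pesos 0))

-- ===== PRECONDITION & SPEC =====
def Spec_monta_mala (pesos : List Int) (out : List Int) : Prop := out = monta_mala_alt pesos
instance (pesos : List Int) (out : List Int) : Decidable (Spec_monta_mala pesos out) := by unfold Spec_monta_mala; infer_instance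

-- ===== CLAIM (what is proved, stated in full; the proofs are below) =====
def Claim_equal_monta_mala : Prop := ∀ (pesos : List Int), Dom_monta_mala pesos → Spec_monta_mala pesos (monta_mala pesos)

-- ===== LEMMAS AND PROOFS =====

theorem loop_eq_take (pesos : List Int) :
    ∀ x : Int, montaMalaLoop pesos x = pesos.take (cutoffB (prefixSumsB pesos x)) := by
  induction pesos with
  | nil => intro x; rfl
  | cons p rest ih =>
      intro x
      simp only [montaMalaLoop, prefixSumsB, cutoffB]
      split_ifs with h h'
      · exact absurd h' (by omega)
      · rfl
      · rw [Nat.add_comm, List.take_succ_cons, ih (x + p)]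
      · exact absurd h (by omega)

-- ===== VERDICT (by name: the statement is the Claim_ definition above) =====
theorem monta_mala_spec : Claim_equal_monta_mala := by
  intro pesos _
  unfold Spec_monta_mala monta_mala monta_mala_alt
  exact loop_eq_take pesos 0
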